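-- pv_equiv track=rewrite | github.com/MinhThuongTMT/AI_Challenge_2025 | projects/Findbot/Map/findbot_main.py | _segments_from_path
-- ===== SOURCE A (Python) =====
-- def _segments_from_path(path):
--     if not path or len(path) < 2:
--         return []
--     segs = []
--     i = 0
--     r0, c0 = path[0]
--     r1, c1 = path[1]
--     cur = (r1 - r0, c1 - c0)
--     length = 1
--     start_idx = 0
--     for k in range(1, len(path) - 1):
--         ra, ca = path[k]
--         rb, cb = path[k + 1]
--         d = (rb - ra, cb - ca)
--         if d == cur:
--             length += 1
--         else:
--             segs.append((cur, length, start_idx, k))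
--             cur = d
--             length = 1
--             start_idx = k
--     segs.append((cur, length, start_idx, len(path) - 1))
--     return segs
-- ===== SOURCE B (Python) =====
-- def _segments_from_path(path):
--     if len(path) < 2:
--         return []
--     dirs = [(b[0] - a[0], b[1] - a[1]) for a, b in zip(path, path[1:])]
--     segs = []
--     s = 0
--     n = len(dirs)
--     while s < n:
--         d = dirs[s]
--         e = s + 1
--         while e < n and dirs[e] == d:
--             e += 1
--         segs.append((d, e - s, s, e))
--         s = e
--     return segs
-- ===== Notes on version B (the rewrite author's own statement) =====
-- stated objective: alternative
-- what changed: A carries run state (cur direction, length, start) through one indexed loop over the path; B first materialises the full list of step directions, then scans it with two pointers, advancing the end pointer over each maximal run and emitting (dir, e-s, s, e) per run.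
import Mathlib
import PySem

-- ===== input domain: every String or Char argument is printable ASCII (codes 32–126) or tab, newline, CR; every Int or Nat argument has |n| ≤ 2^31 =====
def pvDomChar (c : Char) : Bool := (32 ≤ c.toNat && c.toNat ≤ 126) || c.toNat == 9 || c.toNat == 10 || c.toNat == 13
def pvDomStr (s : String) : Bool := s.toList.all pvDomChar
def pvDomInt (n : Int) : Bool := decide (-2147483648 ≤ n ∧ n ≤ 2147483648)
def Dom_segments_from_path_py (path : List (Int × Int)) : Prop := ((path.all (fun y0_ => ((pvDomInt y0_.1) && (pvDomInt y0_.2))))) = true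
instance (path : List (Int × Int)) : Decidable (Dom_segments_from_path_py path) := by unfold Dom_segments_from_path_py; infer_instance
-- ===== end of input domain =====

-- B replaces A's stateful single loop (current direction/length/start carried through an indexed
-- loop) by precomputing the list of step directions and scanning it with two pointers per maximal run.


-- ===== PORT A =====
-- Literal port of A.  path[k] / path[k+1] are always in range in the loop; pyGetD is exact there.
def segments_from_path_py (path : List (Int × Int)) : List ((Int × Int) × Int × Int × Int) :=
  if path = [] ∨ (path.length : Int) < 2 then [] else
    let p0 := PySem.List.pyGetD path 0 ((0 : Int), (0 : Int))
    let p1 := PySem.List.pyGetD path 1 ((0 : Int), (0 : Int))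
    let cur := (p1.1 - p0.1, p1.2 - p0.2)
    let st := (PySem.List.pyRange 1 ((path.length : Int) - 1) 1).foldl
      (fun (st : List ((Int × Int) × Int × Int × Int) × (Int × Int) × Int × Int) k =>
        let pa := PySem.List.pyGetD path k ((0 : Int), (0 : Int))
        let pb := PySem.List.pyGetD path (k + 1) ((0 : Int), (0 : Int))
        let d := (pb.1 - pa.1, pb.2 - pa.2)
        if d = st.2.1 then (st.1, st.2.1, st.2.2.1 + 1, st.2.2.2)
        else (st.1 ++ [(st.2.1, st.2.2.1, st.2.2.2, k)], d, 1, k))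
      ([], cur, 1, 0)
    st.1 ++ [(st.2.1, st.2.2.1, st.2.2.2, (path.length : Int) - 1)]

-- ===== PORT B =====
def pvDirs (path : List (Int × Int)) : List (Int × Int) :=
  List.zipWith (fun a b => (b.1 - a.1, b.2 - a.2)) path path.tail

-- inner while loop = count of the equal-direction prefix after position s
def pvRuns (dirs : List (Int × Int)) (s : Int) : List ((Int × Int) × Int × Int × Int) :=
  match dirs with
  | [] => []
  | d :: rest =>
      let t := (rest.takeWhile (fun x => x == d)).length
      let e := s + 1 + (t : Int)
      (d, e - s, s, e) :: pvRuns (rest.drop t) e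
termination_by dirs.length
decreasing_by simp [List.length_drop]

def segments_from_path_py_alt (path : List (Int × Int)) : List ((Int × Int) × Int × Int × Int) :=
  if (path.length : Int) < 2 then [] else pvRuns (pvDirs path) 0

-- ===== PRECONDITION & SPEC =====
def Spec_segments_from_path_py (path : List (Int × Int)) (out : List ((Int × Int) × Int × Int × Int)) : Prop := out = segments_from_path_py_alt path
instance (path : List (Int × Int)) (out : List ((Int × Int) × Int × Int × Int)) : Decidable (Spec_segments_from_path_py path out) := by unfold Spec_segments_from_path_py; infer_instance

-- ===== CLAIM (what is proved, stated in full; the proofs are below) =====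
def Claim_equal_segments_from_path_py : Prop := ∀ (path : List (Int × Int)), Dom_segments_from_path_py path → Spec_segments_from_path_py path (segments_from_path_py path)

-- ===== LEMMAS AND PROOFS =====

-- canonical middle form: a run in progress (cur, len, start) followed by the remaining directions
def pvConsume (d : Int × Int) (len s : Int) : List (Int × Int) → List ((Int × Int) × Int × Int × Int)
  | [] => [(d, len, s, s + len)]
  | e :: rs => if e = d then pvConsume d (len + 1) s rs
               else (d, len, s, s + len) :: pvConsume e 1 (s + len) rs

lemma pvRuns_nil (s : Int) : pvRuns [] s = [] := by
  rw [pvRuns.eq_def]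

lemma pvRuns_cons (d : Int × Int) (rest : List (Int × Int)) (s : Int) :
    pvRuns (d :: rest) s =
      (d, (s + 1 + ((rest.takeWhile (fun x => x == d)).length : Int)) - s, s,
        s + 1 + ((rest.takeWhile (fun x => x == d)).length : Int))
        :: pvRuns (rest.drop (rest.takeWhile (fun x => x == d)).length)
            (s + 1 + ((rest.takeWhile (fun x => x == d)).length : Int)) := by
  rw [pvRuns.eq_def]

lemma consume_eq_runs (rest : List (Int × Int)) : ∀ (d : Int × Int) (len s : Int),
    pvConsume d len s rest =
      (d, len + ((rest.takeWhile (fun x => x == d)).length : Int), s,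
        s + len + ((rest.takeWhile (fun x => x == d)).length : Int))
        :: pvRuns (rest.drop (rest.takeWhile (fun x => x == d)).length)
            (s + len + ((rest.takeWhile (fun x => x == d)).length : Int)) := by
  induction rest with
  | nil => intro d len s; simp [pvConsume, pvRuns_nil]
  | cons e rs ih =>
    intro d len s
    by_cases h : e = d
    · subst h
      simp only [pvConsume, if_pos rfl, List.takeWhile_cons, beq_self_eq_true, if_true,
        List.length_cons, List.drop_succ_cons]
      rw [ih]
      congr 1
      · simp [Prod.ext_iff]
        try omega
      all_goals congr 1
      all_goals try omega
    · have hb : (e == d) = false := by simp [h]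
      simp only [pvConsume, if_neg h, List.takeWhile_cons, hb, Bool.false_eq_true, if_false,
        List.length_nil, List.drop_zero, Nat.cast_zero, add_zero]
      congr 1
      rw [pvRuns_cons, ih]
      congr 1
      · simp [Prod.ext_iff]
        try omega

lemma runs_cons (d : Int × Int) (rest : List (Int × Int)) (s : Int) :
    pvRuns (d :: rest) s = pvConsume d 1 s rest := by
  rw [pvRuns_cons, consume_eq_runs]
  congr 1
  · simp [Prod.ext_iff]
    try omega
  all_goals congr 1
  all_goals try omega

def pvDirAt (path : List (Int × Int)) (k : Int) : Int × Int :=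
  let pa := PySem.List.pyGetD path k ((0 : Int), (0 : Int))
  let pb := PySem.List.pyGetD path (k + 1) ((0 : Int), (0 : Int))
  (pb.1 - pa.1, pb.2 - pa.2)

def pvStepF (path : List (Int × Int))
    (st : List ((Int × Int) × Int × Int × Int) × (Int × Int) × Int × Int) (k : Int) :
    List ((Int × Int) × Int × Int × Int) × (Int × Int) × Int × Int :=
  let d := pvDirAt path k
  if d = st.2.1 then (st.1, st.2.1, st.2.2.1 + 1, st.2.2.2)
  else (st.1 ++ [(st.2.1, st.2.2.1, st.2.2.2, k)], d, 1, k)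

lemma pvLoop (path : List (Int × Int)) : ∀ (j : Nat) (k : Int)
    (segs : List ((Int × Int) × Int × Int × Int)) (cur : Int × Int) (len start : Int),
    k = (path.length : Int) - 1 - j → start + len = k →
    (let st := (PySem.List.pyRange k ((path.length : Int) - 1) 1).foldl (pvStepF path)
        (segs, cur, len, start)
     st.1 ++ [(st.2.1, st.2.2.1, st.2.2.2, (path.length : Int) - 1)])
    = segs ++ pvConsume cur len start ((List.range j).map (fun i : Nat => pvDirAt path (k + (i : Int)))) := by
  intro j
  induction j with
  | zero =>
    intro k segs cur len start hk hinv
    rw [PySem.List.pyRange_one_eq_nil (by omega)]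
    simp [pvConsume]
    omega
  | succ j ih =>
    intro k segs cur len start hk hinv
    rw [PySem.List.pyRange_one_cons (by omega)]
    have hm : (List.range (j + 1)).map (fun i : Nat => pvDirAt path (k + (i : Int)))
        = pvDirAt path k :: (List.range j).map (fun i : Nat => pvDirAt path ((k + 1) + (i : Int))) := by
      rw [List.range_succ_eq_map, List.map_cons, List.map_map]
      congr 1
      · norm_num
      · apply List.map_congr_left
        intro i _
        simp only [Function.comp]
        congr 1
        push_cast; ring
    rw [hm]
    simp only [List.foldl_cons]
    by_cases h : pvDirAt path k = cur
    · rw [show pvStepF path (segs, cur, len, start) k = (segs, cur, len + 1, start) by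
        simp [pvStepF, h]]
      rw [ih (k + 1) segs cur (len + 1) start (by omega) (by omega)]
      rw [h]
      simp [pvConsume]
    · rw [show pvStepF path (segs, cur, len, start) k
          = (segs ++ [(cur, len, start, k)], pvDirAt path k, 1, k) by simp [pvStepF, h]]
      rw [ih (k + 1) (segs ++ [(cur, len, start, k)]) (pvDirAt path k) 1 k (by omega) (by omega)]
      simp only [pvConsume]
      rw [if_neg h, hinv, List.append_assoc]
      rfl

-- directions read through getD, as a function of the index
def pvDirG (xs : List (Int × Int)) (i : Nat) : Int × Int :=
  ((xs.getD (i + 1) ((0 : Int), (0 : Int))).1 - (xs.getD i ((0 : Int), (0 : Int))).1,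
   (xs.getD (i + 1) ((0 : Int), (0 : Int))).2 - (xs.getD i ((0 : Int), (0 : Int))).2)

lemma map_dirG : ∀ (xs : List (Int × Int)),
    (List.range (xs.length - 1)).map (fun i => pvDirG xs i) = pvDirs xs := by
  intro xs
  induction xs with
  | nil => simp [pvDirs]
  | cons a ys ih =>
    cases ys with
    | nil => simp [pvDirs]
    | cons b tl =>
      have h1 : (a :: b :: tl).length - 1 = (b :: tl).length := by simp
      rw [h1]
      simp only [List.length_cons]
      rw [List.range_succ_eq_map, List.map_cons, List.map_map]
      rw [show pvDirs (a :: b :: tl) = (b.1 - a.1, b.2 - a.2) :: pvDirs (b :: tl) by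
        simp [pvDirs]]
      congr 1

lemma dirAt_shift (p0 : Int × Int) (tl : List (Int × Int)) (i : Nat) :
    pvDirAt (p0 :: tl) (1 + (i : Int)) = pvDirG tl i := by
  have h1 : (1 : Int) + (i : Int) = ((i + 1 : Nat) : Int) := by push_cast; ring
  have h2 : ((i + 1 : Nat) : Int) + 1 = ((i + 2 : Nat) : Int) := by push_cast; ring
  simp only [pvDirAt, h1, h2, PySem.List.pyGetD_natCast]
  simp [pvDirG, show i + 2 = (i + 1) + 1 from rfl]

-- ===== VERDICT (by name: the statement is the Claim_ definition above) =====
theorem segments_from_path_py_spec : Claim_equal_segments_from_path_py := by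
  intro path _
  unfold Spec_segments_from_path_py segments_from_path_py segments_from_path_py_alt
  match path with
  | [] => simp
  | [p] => simp
  | p0 :: p1 :: rest =>
    have hlen : ((p0 :: p1 :: rest).length : Int) = (rest.length : Int) + 2 := by
      simp
      omega
    rw [if_neg (by simp), if_neg (by rw [hlen]; omega)]
    have hF : (fun (st : List ((Int × Int) × Int × Int × Int) × (Int × Int) × Int × Int)
        (k : Int) =>
        let pa := PySem.List.pyGetD (p0 :: p1 :: rest) k ((0 : Int), (0 : Int))
        let pb := PySem.List.pyGetD (p0 :: p1 :: rest) (k + 1) ((0 : Int), (0 : Int))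
        let d := (pb.1 - pa.1, pb.2 - pa.2)
        if d = st.2.1 then (st.1, st.2.1, st.2.2.1 + 1, st.2.2.2)
        else (st.1 ++ [(st.2.1, st.2.2.1, st.2.2.2, k)], d, 1, k))
        = pvStepF (p0 :: p1 :: rest) := by
      funext st k; rfl
    rw [hF]
    have hp0 : PySem.List.pyGetD (p0 :: p1 :: rest) 0 ((0 : Int), (0 : Int)) = p0 :=
      PySem.List.pyGetD_zero_cons _ _ _
    have hp1 : PySem.List.pyGetD (p0 :: p1 :: rest) 1 ((0 : Int), (0 : Int)) = p1 := by
      have : ((1 : Nat) : Int) = (1 : Int) := by norm_num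
      rw [← this, PySem.List.pyGetD_natCast]; rfl
    rw [hp0, hp1]
    rw [pvLoop (p0 :: p1 :: rest) rest.length 1 [] (p1.1 - p0.1, p1.2 - p0.2) 1 0
      (by omega) (by omega)]
    rw [show pvDirs (p0 :: p1 :: rest) = (p1.1 - p0.1, p1.2 - p0.2) :: pvDirs (p1 :: rest) by
      simp [pvDirs]]
    rw [runs_cons]
    rw [List.nil_append]
    congr 1
    calc (List.range rest.length).map (fun i : Nat => pvDirAt (p0 :: p1 :: rest) (1 + (i : Int)))
        = (List.range ((p1 :: rest).length - 1)).map (fun i => pvDirG (p1 :: rest) i) := by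
          simp only [List.length_cons, Nat.add_sub_cancel]
          exact List.map_congr_left (fun i _ => dirAt_shift p0 (p1 :: rest) i)
      _ = pvDirs (p1 :: rest) := map_dirG _
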